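-- pv_equiv track=rewrite | github.com/mco-org/mco | runtime/diff_utils.py | _truncate_file_diff
-- ===== SOURCE A (Python) =====
-- from typing import List, Optional, Tuple
--
-- def _truncate_file_diff(file_diff: str, budget: int) -> str:
--     """Truncate a single file's diff to budget bytes, keeping complete hunks."""
--     lines = file_diff.splitlines(keepends=True)
--     kept: List[str] = []
--     current_size = 0
--     total_hunks = sum(1 for l in lines if l.startswith("@@"))
--     hunks_kept = 0
--
--     in_header = True
--     for line in lines:
--         is_hunk_start = line.startswith("@@")
--         if is_hunk_start:
--             in_header = False
--
--         if current_size + len(line) > budget and not in_header: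
--             remaining = total_hunks - hunks_kept
--             if remaining > 0:
--                 kept.append(f"... (diff truncated, {remaining} more hunks)\n")
--             else:
--                 kept.append("... (diff truncated)\n")
--             break
--
--         if is_hunk_start:
--             hunks_kept += 1
--         kept.append(line)
--         current_size += len(line)
--
--     return "".join(kept)
-- ===== SOURCE B (Python) =====
-- import itertools
--
-- def _truncate_file_diff(file_diff: str, budget: int) -> str:
--     """Truncate a single file's diff to budget bytes, keeping complete hunks."""
--     lines = file_diff.splitlines(keepends=True)
--     # header = everything before the first '@@' line; it is always kept whole
--     header = list(itertools.takewhile(lambda l: not l.startswith("@@"), lines))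
--     body = lines[len(header):]
--     if not body:
--         return file_diff  # no hunks at all: nothing is ever truncated
--     header_size = sum(map(len, header))
--     # cumulative byte total through each body line
--     ends = list(itertools.accumulate(map(len, body), initial=header_size))[1:]
--     kept = list(itertools.takewhile(lambda p: p[1] <= budget, zip(body, ends)))
--     if len(kept) == len(body):
--         return file_diff  # whole diff fits the budget
--     kept_lines = [l for l, _ in kept]
--     remaining = sum(l.startswith("@@") for l in body) - sum(l.startswith("@@") for l in kept_lines)
--     msg = (f"... (diff truncated, {remaining} more hunks)\n" if remaining > 0
--            else "... (diff truncated)\n")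
--     return "".join(header + kept_lines) + msg
-- ===== Notes on version B (the rewrite author's own statement) =====
-- stated objective: alternative
-- what changed: Replaces A's single stateful for-loop (running size, hunks_kept, in_header flag, break) by a declarative pipeline: split the lines into header/body at the first '@@' line, build cumulative byte totals with itertools.accumulate, keep body lines with takewhile against the budget, and derive the remaining-hunk count from the kept slice.
import Mathlib
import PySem

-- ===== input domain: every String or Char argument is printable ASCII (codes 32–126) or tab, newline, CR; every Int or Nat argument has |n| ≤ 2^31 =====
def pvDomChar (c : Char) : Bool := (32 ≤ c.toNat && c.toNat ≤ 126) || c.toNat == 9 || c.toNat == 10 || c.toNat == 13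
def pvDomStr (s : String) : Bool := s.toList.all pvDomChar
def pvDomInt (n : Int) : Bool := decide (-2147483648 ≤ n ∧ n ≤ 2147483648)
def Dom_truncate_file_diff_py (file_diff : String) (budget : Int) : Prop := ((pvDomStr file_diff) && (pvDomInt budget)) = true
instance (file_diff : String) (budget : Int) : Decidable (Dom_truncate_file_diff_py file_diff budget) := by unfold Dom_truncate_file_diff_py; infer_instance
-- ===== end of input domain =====

-- B replaces A's single stateful break-loop by a header/body split plus prefix sums and
-- takewhile (a different decomposition, same cost); return values proved equal on all inputs.

-- shared primitive: s.splitlines(keepends=True) — hand-ported (PySem has only keepends=False);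
-- exact on Dom's character set, where the only line boundaries are "\r\n", "\r", "\n"
def splitKeepGo : List Char → List Char → List (List Char)
  | acc, [] => if acc.isEmpty then [] else [acc.reverse]
  | acc, '\r' :: '\n' :: rest => (acc.reverse ++ ['\r', '\n']) :: splitKeepGo [] rest
  | acc, '\r' :: rest => (acc.reverse ++ ['\r']) :: splitKeepGo [] rest
  | acc, '\n' :: rest => (acc.reverse ++ ['\n']) :: splitKeepGo [] rest
  | acc, c :: rest => splitKeepGo (c :: acc) rest

-- shared literal: the f-string truncation message (both Pythons build the identical literal)
def truncMsg (r : Int) : List Char :=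
  if r > 0 then "... (diff truncated, ".toList ++ PySem.Int.toChars r ++ " more hunks)\n".toList
  else "... (diff truncated)\n".toList

-- ===== PORT A =====
-- A's for-loop with break; state (current_size, hunks_kept, in_header); returns the kept list
def loopA (budget total : Int) : List (List Char) → Int → Int → Bool → List (List Char)
  | [], _, _, _ => []
  | l :: rest, size, hk, inHeader =>
    let isH := PySem.Chars.startswith l ['@', '@']
    let inHeader' := if isH then false else inHeader
    if (decide (size + (l.length : Int) > budget) && !inHeader') = true then
      [truncMsg (total - hk)]
    else
      l :: loopA budget total rest (size + (l.length : Int)) (hk + if isH then 1 else 0) inHeader'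

def truncate_file_diff_py (file_diff : String) (budget : Int) : String :=
  let lines := splitKeepGo [] file_diff.toList
  let total : Int := (lines.map (fun l => if PySem.Chars.startswith l ['@', '@'] then (1 : Int) else 0)).sum
  String.ofList (loopA budget total lines 0 0 true).flatten   -- "".join(kept)

-- ===== PORT B =====
def truncate_file_diff_py_alt (file_diff : String) (budget : Int) : String :=
  let lines := splitKeepGo [] file_diff.toList
  let header := lines.takeWhile (fun l => !PySem.Chars.startswith l ['@', '@'])
  let body := lines.drop header.length
  if body.isEmpty then file_diff
  else
    let headerSize : Int := (header.map (fun l => (l.length : Int))).sum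
    let ends := (body.scanl (fun s t => s + (t.length : Int)) headerSize).drop 1  -- accumulate(..., initial)[1:]
    let kept := (body.zip ends).takeWhile (fun q => decide (q.2 ≤ budget))
    if kept.length = body.length then file_diff
    else
      let keptLines := kept.map Prod.fst
      let remaining : Int := (body.countP (fun t => PySem.Chars.startswith t ['@', '@']) : Int)
        - (keptLines.countP (fun t => PySem.Chars.startswith t ['@', '@']) : Int)
      String.ofList ((header ++ keptLines).flatten ++ truncMsg remaining)

-- ===== PRECONDITION & SPEC =====
def Spec_truncate_file_diff_py (file_diff : String) (budget : Int) (out : String) : Prop := out = truncate_file_diff_py_alt file_diff budget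
instance (file_diff : String) (budget : Int) (out : String) : Decidable (Spec_truncate_file_diff_py file_diff budget out) := by unfold Spec_truncate_file_diff_py; infer_instance

-- ===== CLAIM (what is proved, stated in full; the proofs are below) =====
def Claim_equal_truncate_file_diff_py : Prop := ∀ (file_diff : String) (budget : Int), Dom_truncate_file_diff_py file_diff budget → Spec_truncate_file_diff_py file_diff budget (truncate_file_diff_py file_diff budget)

-- ===== LEMMAS AND PROOFS =====

theorem flatten_splitKeepGo (cs acc : List Char) :
    (splitKeepGo acc cs).flatten = acc.reverse ++ cs := by
  induction acc, cs using splitKeepGo.induct <;>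
    (simp only [splitKeepGo]; try split_ifs) <;> simp_all [List.isEmpty_iff]
theorem scanl_head {α β : Type} (f : β → α → β) (b : β) (xs : List α) :
    List.scanl f b xs = b :: (List.scanl f b xs).tail := by
  cases xs <;> simp [List.scanl]

theorem loopA_header (budget total : Int) (hs : List (List Char))
    (h : ∀ l ∈ hs, PySem.Chars.startswith l ['@', '@'] = false) :
    ∀ tail size hk, loopA budget total (hs ++ tail) size hk true
      = hs ++ loopA budget total tail (size + (hs.map (fun l => (l.length : Int))).sum) hk true := by
  induction hs with
  | nil => intro tail size hk; simp
  | cons l rest ih =>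
    intro tail size hk
    have hl := h l (by simp)
    have ih' := ih (fun x hx => h x (by simp [hx])) tail (size + (l.length : Int)) hk
    simp [loopA, hl, ih', add_assoc]

theorem loopA_first_hunk (budget total : Int) (l : List Char) (rest : List (List Char))
    (h : PySem.Chars.startswith l ['@', '@'] = true) (size hk : Int) :
    loopA budget total (l :: rest) size hk true = loopA budget total (l :: rest) size hk false := by
  simp [loopA, h]

theorem loopA_body (budget total : Int) (ls : List (List Char)) :
    ∀ size hk, loopA budget total ls size hk false =
      (let ends := (ls.scanl (fun s t => s + (t.length : Int)) size).drop 1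
       let kept := (ls.zip ends).takeWhile (fun q => decide (q.2 ≤ budget))
       if kept.length = ls.length then ls
       else (kept.map Prod.fst)
         ++ [truncMsg (total - (hk + ((kept.map Prod.fst).countP (fun t => PySem.Chars.startswith t ['@', '@']) : Int)))]) := by
  induction ls with
  | nil => intro size hk; simp [loopA]
  | cons l rest ih =>
    intro size hk
    simp only [List.scanl_cons, List.drop_succ_cons, List.drop_zero]
    rw [scanl_head, List.zip_cons_cons, List.takeWhile_cons]
    by_cases hc : size + (l.length : Int) > budget
    · simp [loopA, hc, not_le.mpr hc]
    · have hle : size + (l.length : Int) ≤ budget := not_lt.mp hc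
      have ih' := ih (size + (l.length : Int)) (hk + if PySem.Chars.startswith l ['@','@'] then 1 else 0)
      rw [List.drop_one] at ih'
      simp only [loopA, ite_self]
      rw [if_neg (by simp [hc]), ih']
      by_cases hlen : (List.takeWhile (fun q => decide (q.2 ≤ budget))
          (rest.zip (List.scanl (fun s t => s + (t.length : Int)) (size + (l.length : Int)) rest).tail)).length = rest.length
      · simp [hlen, hle]
      · simp [hle, hlen, List.countP_cons]
        congr 1
        split_ifs <;> ring

theorem drop_len_takeWhile (p : List Char → Bool) (lines : List (List Char)) :
    lines.drop (lines.takeWhile p).length = lines.dropWhile p := by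
  induction lines with
  | nil => simp
  | cons a l ih => by_cases h : p a <;> simp [h, ih]

theorem head_dropWhile (p : List Char → Bool) (b : List Char) (rest lines : List (List Char))
    (h : lines.dropWhile p = b :: rest) : p b = false := by
  induction lines with
  | nil => simp at h
  | cons a l ih =>
    by_cases ha : p a
    · exact ih (by simpa [List.dropWhile_cons, ha] using h)
    · simp [ha] at h; simp [← h.1, ha]

theorem main_eq (fd : String) (budget : Int) :
    truncate_file_diff_py fd budget = truncate_file_diff_py_alt fd budget := by
  unfold truncate_file_diff_py truncate_file_diff_py_alt
  simp only [PySem.List.sum_map_ite_one_zero, drop_len_takeWhile]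
  set lines := splitKeepGo [] fd.toList with hlines
  have hflat : lines.flatten = fd.toList := by simpa using flatten_splitKeepGo fd.toList []
  set hd := lines.takeWhile (fun l => !PySem.Chars.startswith l ['@', '@']) with hhd
  have hhead : ∀ l ∈ hd, PySem.Chars.startswith l ['@', '@'] = false := by
    intro l hl
    simpa using List.mem_takeWhile_imp hl
  have hcount0 : hd.countP (fun x => PySem.Chars.startswith x ['@', '@']) = 0 := by
    rw [List.countP_eq_zero]
    intro a ha; simp [hhead a ha]
  have hparts : hd ++ lines.dropWhile (fun l => !PySem.Chars.startswith l ['@', '@']) = lines :=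
    List.takeWhile_append_dropWhile
  cases hbody : lines.dropWhile (fun l => !PySem.Chars.startswith l ['@', '@']) with
  | nil =>
    have hall : lines = hd := by rw [← hparts, hbody, List.append_nil]
    simp only [List.isEmpty_nil]
    conv_lhs => rw [hall, ← List.append_nil hd]
    rw [loopA_header _ _ hd hhead [] 0 0]
    simp only [loopA, List.append_nil]
    rw [← hall, hflat, String.ofList_toList]
    simp
  | cons b rest =>
    have hb : PySem.Chars.startswith b ['@', '@'] = true := by
      simpa using head_dropWhile _ b rest lines hbody
    have htot : (lines.countP (fun x => PySem.Chars.startswith x ['@', '@']) : Int)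
        = ((b :: rest).countP (fun x => PySem.Chars.startswith x ['@', '@']) : Int) := by
      rw [← hparts, hbody, List.countP_append, hcount0]; simp
    have hlineseq : lines = hd ++ b :: rest := by rw [← hparts, hbody]
    rw [htot]
    conv_lhs => rw [hlineseq]
    rw [loopA_header _ _ hd hhead (b :: rest) 0 0, loopA_first_hunk _ _ b rest hb, loopA_body]
    dsimp only
    simp only [zero_add, List.isEmpty_cons, Bool.false_eq_true, if_false]
    split_ifs with hlen
    · conv_rhs => rw [show fd = String.ofList fd.toList from String.ofList_toList.symm, ← hflat, hlineseq]
    · simp [List.flatten_append]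

-- ===== VERDICT (by name: the statement is the Claim_ definition above) =====
theorem truncate_file_diff_py_spec : Claim_equal_truncate_file_diff_py := by
  intro fd budget _
  unfold Spec_truncate_file_diff_py
  exact main_eq fd budget
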